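-- pv_equiv track=rewrite | github.com/NormPlum/freeCodeCamp_DailyCodingChallenges | 167.py | get_bingo_letter
-- ===== SOURCE A (Python) =====
-- def get_bingo_letter(n):
--     bingo = {
--         "B": range(1, 16),
--         "I": range(16, 31),
--         "N": range(31, 46),
--         "G": range(46, 61),
--         "O": range(61, 76),
--     }
--
--     for letter, numbers in bingo.items():
--         if n in numbers:
--             return letter
-- ===== SOURCE B (Python) =====
-- def get_bingo_letter(n):
--     table = {num: letter
--              for i, letter in enumerate("BINGO")
--              for num in range(15 * i + 1, 15 * i + 16)}
--     return table.get(n)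
-- ===== Notes on version B (the rewrite author's own statement) =====
-- stated objective: simpler
-- what changed: B builds one number-to-letter dict by a comprehension over enumerate("BINGO") and replaces A's loop over five range objects with a single table.get(n) lookup (None for any non-matching key, exactly as A).
import Mathlib
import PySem

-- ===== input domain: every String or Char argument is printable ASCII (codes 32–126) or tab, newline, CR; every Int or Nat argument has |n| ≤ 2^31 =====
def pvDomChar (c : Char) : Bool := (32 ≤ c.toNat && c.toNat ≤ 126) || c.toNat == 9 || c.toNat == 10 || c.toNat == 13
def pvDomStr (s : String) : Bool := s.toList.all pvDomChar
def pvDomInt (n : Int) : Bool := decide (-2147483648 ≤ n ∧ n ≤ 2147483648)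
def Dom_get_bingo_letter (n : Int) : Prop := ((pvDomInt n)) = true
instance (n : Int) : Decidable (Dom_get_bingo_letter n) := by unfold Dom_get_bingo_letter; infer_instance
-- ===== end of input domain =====

-- B replaces A's loop over five range objects with one dict lookup built by a comprehension; objective: simpler.


-- ===== PORT A =====
-- the dict of ranges, in insertion order, as a list of (letter, (lo, hi)) with range(lo, hi)
def bingoRanges : List (String × (Int × Int)) :=
  [("B", (1, 16)), ("I", (16, 31)), ("N", (31, 46)), ("G", (46, 61)), ("O", (61, 76))]

-- the for-loop over bingo.items(): first letter whose range contains n (n ∈ range(lo, hi) ↔ lo ≤ n < hi)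
def bingoLoop (n : Int) : List (String × (Int × Int)) → Option String
  | [] => none
  | (letter, lo, hi) :: rest => if lo ≤ n ∧ n < hi then some letter else bingoLoop n rest

def get_bingo_letter (n : Int) : Option String := bingoLoop n bingoRanges

-- ===== PORT B =====
-- table = {num: letter for i, letter in enumerate("BINGO") for num in range(15*i+1, 15*i+16)}
def bingoTable : PySem.Dict Int String :=
  (PySem.List.enumerate "BINGO".toList).foldl
    (fun d p =>
      (PySem.List.pyRange (15 * p.1 + 1) (15 * p.1 + 16) 1).foldl
        (fun d num => d.insert num (String.ofList [p.2])) d)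
    PySem.Dict.empty

def get_bingo_letter_alt (n : Int) : Option String := bingoTable.get? n

-- ===== PRECONDITION & SPEC =====
def Spec_get_bingo_letter (n : Int) (out : Option String) : Prop := out = get_bingo_letter_alt n
instance (n : Int) (out : Option String) : Decidable (Spec_get_bingo_letter n out) := by unfold Spec_get_bingo_letter; infer_instance

-- ===== CLAIM (what is proved, stated in full; the proofs are below) =====
def Claim_equal_get_bingo_letter : Prop := ∀ (n : Int), Dom_get_bingo_letter n → Spec_get_bingo_letter n (get_bingo_letter n)

-- ===== LEMMAS AND PROOFS =====


-- ===== VERDICT (by name: the statement is the Claim_ definition above) =====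
-- every key of the comprehension-built table lies in 1..75 (keys are a concrete 75-element list)
set_option maxRecDepth 10000 in
theorem bingoTable_keys_bounded : ∀ k ∈ bingoTable.keys, 1 ≤ k ∧ k ≤ 75 := by decide

set_option maxRecDepth 10000 in
set_option maxHeartbeats 1000000 in
theorem get_bingo_letter_spec : Claim_equal_get_bingo_letter := by
  intro n _
  unfold Spec_get_bingo_letter get_bingo_letter get_bingo_letter_alt
  by_cases h : 1 ≤ n ∧ n ≤ 75
  · obtain ⟨h1, h2⟩ := h
    interval_cases n <;> decide
  · have hB : bingoTable.get? n = none := by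
      rw [PySem.Dict.get?_eq_none_iff_not_mem_keys]
      intro hm
      exact absurd (bingoTable_keys_bounded n hm) (by omega)
    rw [hB]
    simp only [bingoRanges, bingoLoop]
    split_ifs <;> first | rfl | omega
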